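-- pv_equiv track=rewrite | github.com/chris-arsenault/advent-of-code-2025 | day3/main.py | solve
-- ===== SOURCE A (Python) =====
-- def best_two_digits(s: str) -> int:
--     digits = [int(ch) for ch in s.strip()]
--     n = len(digits)
--     if n < 2:
--         return 0
--     suffix_max = [0] * (n + 1)
--     for i in range(n - 1, -1, -1):
--         suffix_max[i] = max(suffix_max[i + 1], digits[i])
--
--     best = -1
--     for i, d in enumerate(digits[:-1]):
--         candidate = 10 * d + suffix_max[i + 1]
--         if candidate > best:
--             best = candidate
--     return best
--
-- def best_k_digits(s: str, k: int) -> int: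
--     digits = [int(ch) for ch in s.strip()]
--     drop = len(digits) - k
--     stack: list[int] = []
--     for d in digits:
--         while drop and stack and stack[-1] < d:
--             stack.pop()
--             drop -= 1
--         stack.append(d)
--     # if we didn't drop enough due to monotonicity, trim tail
--     stack = stack[:k]
--     return int("".join(str(d) for d in stack))
--
-- def solve(lines: list[str], k: int = 12) -> tuple[int, int]:
--     p1 = 0
--     p2 = 0
--     for line in lines:
--         line = line.strip()
--         if not line:
--             continue
--         p1 += best_two_digits(line)
--         p2 += best_k_digits(line, k)
--     return p1, p2
-- ===== SOURCE B (Python) =====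
-- def best_two_digits(s: str) -> int:
--     digits = [int(ch) for ch in s.strip()]
--     n = len(digits)
--     if n < 2:
--         return 0
--     best = -1
--     for i, d in enumerate(digits):
--         for e in digits[i + 1:]:
--             candidate = 10 * d + e
--             if candidate > best:
--                 best = candidate
--     return best
--
-- def best_k_digits(s: str, k: int) -> int:
--     digits = [int(ch) for ch in s.strip()]
--     drop = len(digits) - k
--     stack: list[int] = []
--     for d in digits:
--         while drop and stack and stack[-1] < d:
--             stack.pop()
--             drop -= 1
--         stack.append(d)
--     # if we didn't drop enough due to monotonicity, trim tail
--     stack = stack[:k]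
--     return int("".join(str(d) for d in stack))
--
-- def solve(lines: list[str], k: int = 12) -> tuple[int, int]:
--     stripped = [s for s in map(str.strip, lines) if s]
--     p1 = sum(best_two_digits(s) for s in stripped)
--     p2 = sum(best_k_digits(s, k) for s in stripped)
--     return p1, p2
-- ===== Notes on version B (the rewrite author's own statement) =====
-- stated objective: simpler
-- what changed: best_two_digits drops the suffix-max table in favour of a direct scan over all ordered index pairs, and solve replaces its two-accumulator loop by filtering the stripped lines once and summing each part with sum(); best_k_digits is kept verbatim.
import Mathlib
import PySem

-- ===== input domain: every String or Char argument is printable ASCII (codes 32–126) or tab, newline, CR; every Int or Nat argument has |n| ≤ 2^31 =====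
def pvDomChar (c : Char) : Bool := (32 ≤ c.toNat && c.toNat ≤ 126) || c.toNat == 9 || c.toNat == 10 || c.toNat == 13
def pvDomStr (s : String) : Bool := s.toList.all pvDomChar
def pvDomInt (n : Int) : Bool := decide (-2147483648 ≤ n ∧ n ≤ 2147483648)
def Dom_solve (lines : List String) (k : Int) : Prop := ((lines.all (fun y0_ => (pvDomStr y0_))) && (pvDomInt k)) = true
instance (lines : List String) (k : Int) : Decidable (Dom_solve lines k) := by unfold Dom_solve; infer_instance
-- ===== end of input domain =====

-- B replaces best_two_digits' suffix-max table by a plain nested scan over all ordered pairs and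
-- solve's accumulator loop by filter + two sums: simpler code, same exact results.


-- ===== PORT A =====
-- int(ch) for ch in s.strip(); int(ch) raises on a non-digit char (excluded by Pre_), there the
-- port's .getD 0 default is unreachable inside Pre_.
def pvDigits (s : String) : List Int :=
  (PySem.Str.strip s).toList.map (fun ch => (PySem.Int.ofChars? [ch]).getD 0)

-- suffix_max[i] = max(suffix_max[i+1], digits[i]), built back-to-front exactly like A's loop
def pvSuffixMax : List Int → List Int
  | [] => [0]
  | d :: rest => (max (pvSuffixMax rest).headI d) :: pvSuffixMax rest

-- for i, d in enumerate(digits[:-1]): candidate = 10*d + suffix_max[i+1]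
def pvBestLoopA : List Int → List Int → Int → Int
  | [], _, best => best
  | [_], _, best => best
  | d :: rest, sm, best =>
      let smRest := sm.tail
      let candidate := 10 * d + smRest.headI
      pvBestLoopA rest smRest (if candidate > best then candidate else best)

def pvBestTwoA (s : String) : Int :=
  let digits := pvDigits s
  if digits.length < 2 then 0
  else pvBestLoopA digits (pvSuffixMax digits) (-1)

-- the inner 'while drop and stack and stack[-1] < d' loop (drop is truthy iff ≠ 0)
def pvPopWhile (d : Int) : List Int → Int → List Int × Int
  | [], dr => ([], dr)
  | x :: xs, dr =>
      if dr ≠ 0 ∧ (x :: xs).getLast (by simp) < d then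
        pvPopWhile d (x :: xs).dropLast (dr - 1)
      else (x :: xs, dr)
  termination_by st _ => st.length
  decreasing_by simp

-- best_k_digits, kept verbatim in B as well (shared helper of both ports)
def pvBestK (s : String) (k : Int) : Int :=
  let digits := pvDigits s
  let res := digits.foldl (fun (st : List Int × Int) d =>
      let p := pvPopWhile d st.1 st.2
      (p.1 ++ [d], p.2)) ([], (digits.length : Int) - k)
  let stack := PySem.List.slice res.1 none (some k)
  (PySem.Int.ofChars? (PySem.Chars.join [] (stack.map PySem.Int.toChars))).getD 0

def solve (lines : List String) (k : Int) : Int × Int :=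
  lines.foldl (fun (acc : Int × Int) line =>
    let l := PySem.Str.strip line
    if l = "" then acc
    else (acc.1 + pvBestTwoA l, acc.2 + pvBestK l k)) (0, 0)

-- ===== PORT B =====
-- for e in digits[i+1:]: candidate = 10*d + e
def pvInnerB (d : Int) : List Int → Int → Int
  | [], best => best
  | e :: rest, best =>
      pvInnerB d rest (if 10 * d + e > best then 10 * d + e else best)

-- for i, d in enumerate(digits): inner loop over digits[i+1:]
def pvPairsB : List Int → Int → Int
  | [], best => best
  | d :: rest, best => pvPairsB rest (pvInnerB d rest best)

def pvBestTwoB (s : String) : Int :=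
  let digits := pvDigits s
  if digits.length < 2 then 0
  else pvPairsB digits (-1)

def solve_alt (lines : List String) (k : Int) : Int × Int :=
  let stripped := (lines.map PySem.Str.strip).filter (fun s => s ≠ "")
  ((stripped.map pvBestTwoB).sum, (stripped.map (fun s => pvBestK s k)).sum)

-- ===== PRECONDITION & SPEC =====
-- count of positions whose digit is ≥ every later digit (compared as chars): for k ≤ -1 this is
-- the length of best_k_digits' final stack, so stack[:k] is nonempty iff this count exceeds -k
def pvStairCount : List Char → Nat × Int
  | [] => (0, 0)
  | c :: rest =>
      let p := pvStairCount rest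
      (max p.1 c.toNat, if p.1 ≤ c.toNat then p.2 + 1 else p.2)

def pvLineOk (l : String) (k : Int) : Bool :=
  decide (PySem.Str.strip l = "") || decide (1 ≤ k) ||
  (decide (k ≤ -1) && decide (1 ≤ (pvStairCount (PySem.Str.strip l).toList).2 + k))

-- Pre_ excludes exactly the inputs where A raises ValueError: a non-digit character in some
-- stripped nonempty line (int(ch) raises), or a nonempty line with k ≤ 0 whose suffix-maxima
-- staircase leaves stack[:k] empty (k = 0, or k ≤ -1 with at most -k staircase digits), where
-- int("") raises.
def Pre_solve (lines : List String) (k : Int) : Prop :=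
  (lines.all (fun l => (PySem.Str.strip l).toList.all PySem.Chars.isdigit)
    && lines.all (fun l => pvLineOk l k)) = true
instance (lines : List String) (k : Int) : Decidable (Pre_solve lines k) := by unfold Pre_solve; infer_instance

def pvWitness_solve : List String × Int := (["987", "  19 ", ""], 2)

def Spec_solve (lines : List String) (k : Int) (out : Int × Int) : Prop := out = solve_alt lines k
instance (lines : List String) (k : Int) (out : Int × Int) : Decidable (Spec_solve lines k out) := by unfold Spec_solve; infer_instance

-- ===== CLAIM (what is proved, stated in full; the proofs are below) =====
def Claim_equal_solve : Prop := ∀ (lines : List String) (k : Int), Dom_solve lines k → Pre_solve lines k → Spec_solve lines k (solve lines k)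

-- ===== LEMMAS AND PROOFS =====

-- max of a list with floor 0, the value A's suffix_max table holds
def pvM (l : List Int) : Int := l.foldr (fun d a => max a d) 0

theorem pvSuffixMax_headI (l : List Int) : (pvSuffixMax l).headI = pvM l := by
  induction l with
  | nil => simp [pvSuffixMax, pvM]
  | cons d rest ih =>
    have h : (pvSuffixMax (d :: rest)).headI = max (pvSuffixMax rest).headI d := rfl
    rw [h, ih]
    simp [pvM]

theorem pvDigit_nonneg (ch : Char) (h : PySem.Chars.isdigit ch = true) :
    0 ≤ (PySem.Int.ofChars? [ch]).getD 0 := by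
  simp [PySem.Chars.isdigit] at h
  have h48 : 48 ≤ ch.toNat := by simpa using h.1
  have h57 : ch.toNat ≤ 57 := by simpa using h.2
  interval_cases hc : ch.toNat <;>
    · have : ch = Char.ofNat ch.toNat := by rw [Char.ofNat_toNat]
      rw [hc] at this
      subst this
      decide

theorem pvInnerB_eq (d : Int) (xs : List Int) :
    (∀ x ∈ xs, 0 ≤ x) → ∀ b, xs ≠ [] → pvInnerB d xs b = max b (10 * d + pvM xs) := by
  induction xs with
  | nil => intro _ b h; exact absurd rfl h
  | cons x rest ih =>
    intro hnn b _
    cases rest with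
    | nil =>
      have hx : 0 ≤ x := hnn x (by simp)
      simp [pvInnerB, pvM]
      omega
    | cons y r =>
      have hrest : ∀ z ∈ y :: r, 0 ≤ z := fun z hz => hnn z (List.mem_cons_of_mem x hz)
      rw [pvInnerB, ih hrest _ (List.cons_ne_nil y r)]
      have hM : pvM (x :: y :: r) = max (pvM (y :: r)) x := by simp [pvM]
      rw [hM]
      omega

theorem pvLoops_eq (digits : List Int) :
    (∀ x ∈ digits, 0 ≤ x) → ∀ b, pvBestLoopA digits (pvSuffixMax digits) b = pvPairsB digits b := by
  induction digits with
  | nil => intro _ b; simp [pvBestLoopA, pvPairsB]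
  | cons d rest ih =>
    intro hnn b
    cases rest with
    | nil => simp [pvBestLoopA, pvPairsB, pvInnerB]
    | cons y r =>
      have hrest : ∀ z ∈ y :: r, 0 ≤ z := fun z hz => hnn z (List.mem_cons_of_mem d hz)
      have hA : pvBestLoopA (d :: y :: r) (pvSuffixMax (d :: y :: r)) b
          = pvBestLoopA (y :: r) (pvSuffixMax (d :: y :: r)).tail
              (if 10 * d + ((pvSuffixMax (d :: y :: r)).tail).headI > b
               then 10 * d + ((pvSuffixMax (d :: y :: r)).tail).headI else b) := rfl
      have hB : pvPairsB (d :: y :: r) b = pvPairsB (y :: r) (pvInnerB d (y :: r) b) := rfl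
      rw [hA, hB]
      rw [pvInnerB_eq d (y :: r) hrest b (List.cons_ne_nil y r)]
      have hsm : (pvSuffixMax (d :: y :: r)).tail = pvSuffixMax (y :: r) := rfl
      rw [hsm, pvSuffixMax_headI]
      have hif : (if 10 * d + pvM (y :: r) > b then 10 * d + pvM (y :: r) else b)
          = max b (10 * d + pvM (y :: r)) := by omega
      rw [hif, ih hrest]

theorem pvBestTwo_eq (s : String)
    (h : ∀ ch ∈ (PySem.Str.strip s).toList, PySem.Chars.isdigit ch = true) :
    pvBestTwoA s = pvBestTwoB s := by
  have hnn : ∀ x ∈ pvDigits s, 0 ≤ x := by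
    intro x hx
    simp only [pvDigits, List.mem_map] at hx
    obtain ⟨ch, hch, rfl⟩ := hx
    exact pvDigit_nonneg ch (h ch hch)
  unfold pvBestTwoA pvBestTwoB
  by_cases hlen : (pvDigits s).length < 2
  · simp [hlen]
  · simp [hlen, pvLoops_eq (pvDigits s) hnn]

theorem pvMem_strip {x : Char} {cs : List Char} (h : x ∈ PySem.Chars.strip cs) : x ∈ cs := by
  simp only [PySem.Chars.strip, PySem.Chars.rstrip, PySem.Chars.lstrip, List.mem_reverse] at h
  have h2 := (List.dropWhile_sublist (p := PySem.Chars.isspace)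
      (l := (List.dropWhile PySem.Chars.isspace cs).reverse)).mem h
  rw [List.mem_reverse] at h2
  exact (List.dropWhile_sublist _).mem h2

theorem solve_fold (lines : List String) (k : Int) (p : Int × Int)
    (h : ∀ l ∈ lines, ∀ ch ∈ (PySem.Str.strip l).toList, PySem.Chars.isdigit ch = true) :
    lines.foldl (fun (acc : Int × Int) line =>
      let l := PySem.Str.strip line
      if l = "" then acc
      else (acc.1 + pvBestTwoA l, acc.2 + pvBestK l k)) p
    = (p.1 + (((lines.map PySem.Str.strip).filter (fun s => s ≠ "")).map pvBestTwoB).sum,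
       p.2 + (((lines.map PySem.Str.strip).filter (fun s => s ≠ "")).map (fun s => pvBestK s k)).sum) := by
  induction lines generalizing p with
  | nil => simp
  | cons line rest ih =>
    have hline := h line (by simp)
    have hrest : ∀ l ∈ rest, ∀ ch ∈ (PySem.Str.strip l).toList, PySem.Chars.isdigit ch = true :=
      fun l hl => h l (by simp [hl])
    by_cases he : PySem.Str.strip line = ""
    · simp only [List.foldl_cons, List.map_cons, List.filter_cons, he]
      simp [ih p hrest]
    · have hb : pvBestTwoA (PySem.Str.strip line) = pvBestTwoB (PySem.Str.strip line) := by
        apply pvBestTwo_eq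
        intro ch hch
        apply hline ch
        simp only [PySem.Str.toList_strip] at hch ⊢
        exact pvMem_strip hch
      simp only [List.foldl_cons, List.map_cons, List.filter_cons, he]
      rw [ih _ hrest]
      simp [he, hb]
      constructor <;> ring

-- ===== VERDICT (by name: the statement is the Claim_ definition above) =====
theorem solve_spec : Claim_equal_solve := by
  intro lines k _ hpre
  rw [Pre_solve, Bool.and_eq_true] at hpre
  have h : ∀ l ∈ lines, ∀ ch ∈ (PySem.Str.strip l).toList, PySem.Chars.isdigit ch = true := by
    simpa [List.all_eq_true] using hpre.1
  unfold Spec_solve solve solve_alt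
  rw [solve_fold lines k (0, 0) h]
  simp
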